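-- pv_equiv track=rewrite | github.com/kelaplicativos-rgb/ia-planilhas | bling_app_zero/core/validator.py | validar_gtin_checksum
-- ===== SOURCE A (Python) =====
-- def validar_gtin_checksum(gtin: str) -> bool:
--     if not gtin or not gtin.isdigit():
--         return False
--
--     if len(gtin) not in {8, 12, 13, 14}:
--         return False
--
--     digitos = [int(d) for d in gtin]
--     check_digit = digitos[-1]
--     corpo = digitos[:-1]
--
--     soma = 0
--     peso = 3
--     for n in reversed(corpo):
--         soma += n * peso
--         peso = 1 if peso == 3 else 3
--
--     calculado = (10 - (soma % 10)) % 10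
--     return calculado == check_digit
-- ===== SOURCE B (Python) =====
-- def validar_gtin_checksum(gtin: str) -> bool:
--     if not gtin or not gtin.isdigit():
--         return False
--
--     if len(gtin) not in {8, 12, 13, 14}:
--         return False
--
--     # Normalize to GTIN-14 by left-padding with zeros; then the weights are a
--     # fixed position table and validity is "total weighted sum divisible by 10"
--     # (the check digit itself participates with weight 1).
--     padded = gtin.zfill(14)
--     weights = (3, 1, 3, 1, 3, 1, 3, 1, 3, 1, 3, 1, 3, 1)
--     total = sum(int(d) * w for d, w in zip(padded, weights))
--     return total % 10 == 0
-- ===== Notes on version B (the rewrite author's own statement) =====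
-- stated objective: alternative
-- what changed: Instead of extracting the check digit and running a toggling-weight accumulator over the reversed body, B normalizes the code to GTIN-14 by zero-padding (zfill), multiplies against a fixed left-to-right weight table, and tests that the total weighted sum (check digit included, weight 1) is divisible by 10.
import Mathlib
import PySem

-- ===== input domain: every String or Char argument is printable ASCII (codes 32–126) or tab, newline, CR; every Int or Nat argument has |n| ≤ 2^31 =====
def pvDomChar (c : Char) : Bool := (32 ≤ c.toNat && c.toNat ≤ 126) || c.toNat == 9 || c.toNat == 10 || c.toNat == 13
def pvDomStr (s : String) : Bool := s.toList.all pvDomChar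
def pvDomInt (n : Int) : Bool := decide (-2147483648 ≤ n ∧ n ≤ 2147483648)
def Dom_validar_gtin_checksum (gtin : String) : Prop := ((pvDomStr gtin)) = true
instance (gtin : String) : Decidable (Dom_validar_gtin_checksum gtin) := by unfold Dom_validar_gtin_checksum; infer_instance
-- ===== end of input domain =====

-- B keeps A's guards but replaces the check-digit extraction + reversed toggling-weight loop by
-- GTIN-14 normalization (zero-pad with zfill), a fixed positional weight table and a
-- "total weighted sum divisible by 10" test; same result, a different decomposition.

-- ===== PORT A =====
-- int(d) for a single char d; exact here because both ports only apply it after the isdigit guard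
def pvDigit (c : Char) : Int := (c.toNat : Int) - 48

def validar_gtin_checksum (gtin : String) : Bool :=
  if gtin.toList.isEmpty || !(PySem.Str.strIsdigit gtin) then false
  else if !(PySem.Str.len gtin == 8 || PySem.Str.len gtin == 12 ||
            PySem.Str.len gtin == 13 || PySem.Str.len gtin == 14) then false
  else
    let digitos := gtin.toList.map pvDigit
    -- digitos[-1]; the length guard makes the list nonempty, so Python never raises here
    let check_digit := (PySem.List.pyGet? digitos (-1)).getD 0
    let corpo := PySem.List.slice digitos none (some (-1))
    let soma_peso := corpo.reverse.foldl
      (fun (sp : Int × Int) n => (sp.1 + n * sp.2, if sp.2 == 3 then 1 else 3)) (0, 3)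
    let calculado := PySem.Int.mod (10 - PySem.Int.mod soma_peso.1 10) 10
    calculado == check_digit

-- ===== PORT B =====
def validar_gtin_checksum_alt (gtin : String) : Bool :=
  if gtin.toList.isEmpty || !(PySem.Str.strIsdigit gtin) then false
  else if !(PySem.Str.len gtin == 8 || PySem.Str.len gtin == 12 ||
            PySem.Str.len gtin == 13 || PySem.Str.len gtin == 14) then false
  else
    let padded := PySem.Str.zfill gtin 14
    let weights : List Int := [3, 1, 3, 1, 3, 1, 3, 1, 3, 1, 3, 1, 3, 1]
    let total := (List.zipWith (fun d w => pvDigit d * w) padded.toList weights).sum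
    PySem.Int.mod total 10 == 0

-- ===== PRECONDITION & SPEC =====
def Spec_validar_gtin_checksum (gtin : String) (out : Bool) : Prop := out = validar_gtin_checksum_alt gtin
instance (gtin : String) (out : Bool) : Decidable (Spec_validar_gtin_checksum gtin out) := by unfold Spec_validar_gtin_checksum; infer_instance

-- ===== CLAIM (what is proved, stated in full; the proofs are below) =====
def Claim_equal_validar_gtin_checksum : Prop := ∀ (gtin : String), Dom_validar_gtin_checksum gtin → Spec_validar_gtin_checksum gtin (validar_gtin_checksum gtin)

-- ===== LEMMAS AND PROOFS =====

-- alternating-weight sum from the left, starting with weight w (weights toggle 3 ↔ 1 via 4 - w)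
def pvZsum : Int → List Int → Int
  | _, [] => 0
  | w, a :: t => a * w + pvZsum (4 - w) t

-- the alternating weight table of length n starting at w
def pvWpat : Int → Nat → List Int
  | _, 0 => []
  | w, n + 1 => w :: pvWpat (4 - w) n

theorem pvWpat_14 : pvWpat 3 14 = [3, 1, 3, 1, 3, 1, 3, 1, 3, 1, 3, 1, 3, 1] := by decide

-- B's zip-sum against the weight table is pvZsum
theorem pvZip_eq_zsum (l : List Int) : ∀ w : Int,
    (List.zipWith (· * ·) l (pvWpat w l.length)).sum = pvZsum w l := by
  induction l with
  | nil => intro w; simp [pvWpat, pvZsum]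
  | cons a t ih => intro w; simp [pvWpat, pvZsum, ih]

-- A's toggling loop is pvZsum (for the two weights the loop actually holds)
theorem pvToggle_eq_zsum (l : List Int) : ∀ (s w : Int), w = 3 ∨ w = 1 →
    ((l.foldl (fun (sp : Int × Int) n => (sp.1 + n * sp.2, if sp.2 == 3 then 1 else 3)) (s, w)).1
      = s + pvZsum w l) := by
  induction l with
  | nil => intro s w _; simp [pvZsum]
  | cons a t ih =>
    intro s w hw
    rcases hw with rfl | rfl
    · rw [List.foldl_cons, show ((3:Int) == 3) = true by decide]
      simp only [if_true]
      rw [ih (s + a * 3) 1 (Or.inr rfl)]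
      show _ = s + (a * 3 + pvZsum (4 - 3) t)
      norm_num; ring
    · rw [List.foldl_cons, show ((1:Int) == 3) = false by decide]
      simp only [Bool.false_eq_true, if_false]
      rw [ih (s + a * 1) 3 (Or.inl rfl)]
      show _ = s + (a * 1 + pvZsum (4 - 1) t)
      norm_num; ring

theorem pvZsum_append (l r : List Int) : ∀ w : Int,
    pvZsum w (l ++ r) = pvZsum w l + pvZsum (if l.length % 2 = 0 then w else 4 - w) r := by
  induction l with
  | nil => intro w; simp [pvZsum]
  | cons a t ih =>
    intro w
    simp only [List.cons_append, pvZsum, ih (4 - w), List.length_cons]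
    by_cases hp : t.length % 2 = 0
    · rw [if_pos hp, if_neg (by omega)]; ring_nf
    · rw [if_neg hp, if_pos (by omega)]; ring_nf

theorem pvZsum_reverse (l : List Int) : ∀ w : Int,
    pvZsum w l.reverse = pvZsum (if l.length % 2 = 1 then w else 4 - w) l := by
  induction l with
  | nil => intro w; simp [pvZsum]
  | cons a t ih =>
    intro w
    rw [List.reverse_cons, pvZsum_append, ih]
    simp only [List.length_reverse, List.length_cons, pvZsum]
    by_cases hp : t.length % 2 = 0
    · rw [if_neg (by omega), if_pos hp, if_pos (by omega)]; ring_nf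
    · rw [if_pos (by omega), if_neg hp, if_neg (by omega)]; ring_nf

theorem pvZsum_replicate_zero (k : Nat) : ∀ w : Int, pvZsum w (List.replicate k 0) = 0 := by
  induction k with
  | zero => intro w; simp [pvZsum]
  | succ n ih => intro w; simp [List.replicate_succ, pvZsum, ih]

theorem pvDigit_bounds (c : Char) (h : PySem.Chars.isdigit c = true) :
    0 ≤ pvDigit c ∧ pvDigit c ≤ 9 := by
  simp only [PySem.Chars.isdigit, Bool.and_eq_true, decide_eq_true_eq] at h
  obtain ⟨ha, hb⟩ := h
  rw [Char.le_def, UInt32.le_iff_toNat_le] at ha hb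
  have e0 : ('0' : Char).val.toNat = 48 := by decide
  have e9 : ('9' : Char).val.toNat = 57 := by decide
  have ec : c.toNat = c.val.toNat := rfl
  unfold pvDigit
  omega

theorem pvNotSign (c : Char) (h : PySem.Chars.isdigit c = true) : ¬(c = '+' ∨ c = '-') := by
  rintro (rfl | rfl) <;> exact absurd h (by decide)

theorem pvZfill (cs : List Char) (hne : cs ≠ []) (hd : PySem.Chars.isdigit (cs.head hne) = true)
    (hlen : cs.length ≤ 14) :
    PySem.Chars.zfill cs 14 = List.replicate (14 - cs.length) '0' ++ cs := by
  unfold PySem.Chars.zfill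
  by_cases h14 : (14 : Int) ≤ (cs.length : Int)
  · have : cs.length = 14 := by omega
    rw [if_pos h14, this]
    simp
  · rw [if_neg h14]
    cases cs with
    | nil => exact absurd rfl hne
    | cons c rest =>
      have hc : ¬(c = '+' ∨ c = '-') := pvNotSign c (by simpa using hd)
      simp only [if_neg hc]
      norm_num
      omega

-- digitos[-1] for a nonempty digit list written as l ++ [a]
theorem pvLast (l : List Int) (a : Int) : (PySem.List.pyGet? (l ++ [a]) (-1)).getD 0 = a := by
  simp [PySem.List.pyGet?, PySem.List.pyIdx?]

-- ===== VERDICT (by name: the statement is the Claim_ definition above) =====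
theorem pvMod10 (a : Int) : PySem.Int.mod a 10 = a % 10 := by
  simp [PySem.Int.mod, Int.fmod_eq_emod]

theorem validar_gtin_checksum_spec : Claim_equal_validar_gtin_checksum := by
  intro gtin _
  unfold Spec_validar_gtin_checksum validar_gtin_checksum validar_gtin_checksum_alt
  by_cases hg1 : gtin.toList.isEmpty || !(PySem.Str.strIsdigit gtin)
  · simp only [hg1, if_true]
  · simp only [hg1, if_false, Bool.false_eq_true]
    by_cases hg2 : !(PySem.Str.len gtin == 8 || PySem.Str.len gtin == 12 ||
            PySem.Str.len gtin == 13 || PySem.Str.len gtin == 14)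
    · simp only [hg2, if_true]
    · simp only [hg2, if_false, Bool.false_eq_true]
      have hb : (gtin.toList.isEmpty || !(PySem.Str.strIsdigit gtin)) = false :=
        Bool.eq_false_iff.mpr hg1
      simp only [Bool.or_eq_false_iff, Bool.not_eq_false'] at hb
      have hne : gtin.toList ≠ [] := by
        intro h; rw [h] at hb; simp at hb
      have hdig : ∀ x ∈ gtin.toList, PySem.Chars.isdigit x = true := by
        have h2 := hb.2
        rw [PySem.Str.strIsdigit_eq] at h2
        simp only [PySem.Chars.strIsdigit, Bool.and_eq_true, List.all_eq_true] at h2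
        exact h2.2
      have hn : gtin.toList.length = 8 ∨ gtin.toList.length = 12 ∨
          gtin.toList.length = 13 ∨ gtin.toList.length = 14 := by
        have hX := Bool.eq_false_iff.mpr hg2
        simp only [Bool.not_eq_false', Bool.or_eq_true, beq_iff_eq] at hX
        have hl : PySem.Str.len gtin = (gtin.toList.length : Int) := by simp [PySem.Str.len]
        rw [hl] at hX
        omega
      obtain ⟨dl, c, hsplit⟩ : ∃ dl c, gtin.toList = dl ++ [c] :=
        ⟨_, _, (List.dropLast_concat_getLast hne).symm⟩
      have hdl : dl.length + 1 = gtin.toList.length := by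
        rw [hsplit]; simp
      have hcheck : (PySem.List.pyGet? (gtin.toList.map pvDigit) (-1)).getD 0 = pvDigit c := by
        rw [hsplit]
        simp only [List.map_append, List.map_cons, List.map_nil]
        exact pvLast _ _
      have hcorpo : PySem.List.slice (gtin.toList.map pvDigit) none (some (-1))
          = dl.map pvDigit := by
        rw [PySem.List.slice_to_neg_one, hsplit]
        simp only [List.map_append, List.map_cons, List.map_nil, List.dropLast_concat]
      have hsoma : (((dl.map pvDigit).reverse).foldl
          (fun (sp : Int × Int) n => (sp.1 + n * sp.2, if sp.2 == 3 then 1 else 3)) (0, 3)).1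
          = pvZsum 3 (dl.map pvDigit).reverse := by
        simpa using pvToggle_eq_zsum (dl.map pvDigit).reverse 0 3 (Or.inl rfl)
      have hpad : (PySem.Str.zfill gtin 14).toList
          = List.replicate (14 - gtin.toList.length) '0' ++ gtin.toList := by
        rw [PySem.Str.toList_zfill]
        exact pvZfill _ hne (hdig _ (List.head_mem hne)) (by omega)
      have hmapz : (PySem.Str.zfill gtin 14).toList.map pvDigit
          = List.replicate (14 - gtin.toList.length) (0 : Int) ++ gtin.toList.map pvDigit := by
        rw [hpad, List.map_append, List.map_replicate, show pvDigit '0' = 0 from by decide]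
      have hzip : (List.zipWith (fun d w => pvDigit d * w) (PySem.Str.zfill gtin 14).toList
            ([3, 1, 3, 1, 3, 1, 3, 1, 3, 1, 3, 1, 3, 1] : List Int)).sum
          = pvZsum 3 ((PySem.Str.zfill gtin 14).toList.map pvDigit) := by
        have hl : ((PySem.Str.zfill gtin 14).toList.map pvDigit).length = 14 := by
          rw [hmapz, List.length_append, List.length_replicate, List.length_map]; omega
        have e := List.zipWith_map_left (l₁ := (PySem.Str.zfill gtin 14).toList)
          (l₂ := pvWpat 3 14) (f := pvDigit) (g := (· * ·))
        rw [← pvWpat_14, ← e, ← hl]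
        exact pvZip_eq_zsum _ 3
      have key : pvZsum 3 ((PySem.Str.zfill gtin 14).toList.map pvDigit)
          = pvZsum 3 (dl.map pvDigit).reverse + pvDigit c := by
        rw [hmapz, hsplit]
        simp only [List.map_append, List.map_cons, List.map_nil]
        rw [← List.append_assoc]
        rw [pvZsum_append, pvZsum_append, pvZsum_replicate_zero, pvZsum_reverse]
        simp only [List.length_append, List.length_replicate, List.length_map,
          List.length_cons, List.length_nil]
        rcases hn with h | h | h | h
        · have e : dl.length = 7 := by omega
          rw [e]; norm_num [pvZsum]
        · have e : dl.length = 11 := by omega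
          rw [e]; norm_num [pvZsum]
        · have e : dl.length = 12 := by omega
          rw [e]; norm_num [pvZsum]
        · have e : dl.length = 13 := by omega
          rw [e]; norm_num [pvZsum]
      have hcd := pvDigit_bounds c (hdig c (by rw [hsplit]; simp))
      simp only [hcorpo, hcheck, hsoma, hzip, key, pvMod10]
      rw [Bool.eq_iff_iff]
      simp only [beq_iff_eq]
      omega
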